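-- pv_equiv track=rewrite | github.com/decoct-io/decoct | src/decoct/agent_qa/bridge.py | _extract_tier_a_types_section
-- ===== SOURCE A (Python) =====
-- def _extract_tier_a_types_section(tier_a_content: str) -> str:
--     """Extract just the ``types`` section from Tier A YAML for fleet context.
--
--     Returns the types block (with counts and summaries) without assertions
--     or topology, to keep the excerpt compact.
--     """
--     lines = tier_a_content.splitlines(keepends=True)
--     result: list[str] = []
--     in_types = False
--     for line in lines:
--         stripped = line.rstrip()
--         # Detect top-level keys (no indentation)
--         if stripped and not stripped[0].isspace() and stripped.endswith(":"):
--             if stripped == "types:":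
--                 in_types = True
--                 result.append(line)
--                 continue
--             elif in_types:
--                 # Hit another top-level key — stop
--                 break
--         if in_types:
--             result.append(line)
--     return "".join(result) if result else ""
-- ===== SOURCE B (Python) =====
-- def _extract_tier_a_types_section(tier_a_content: str) -> str:
--     """Boundary-finding re-implementation: locate the start of the top-level
--     ``types:`` block and its terminating top-level key, then slice."""
--     lines = tier_a_content.splitlines(keepends=True)
--
--     def is_top_level_key(line):
--         stripped = line.rstrip()
--         return bool(stripped) and not stripped[0].isspace() and stripped.endswith(":")
--
--     start = next((i for i, ln in enumerate(lines)
--                   if is_top_level_key(ln) and ln.rstrip() == "types:"), None)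
--     if start is None:
--         return ""
--     end = next((j for j in range(start + 1, len(lines))
--                 if is_top_level_key(lines[j]) and lines[j].rstrip() != "types:"),
--                len(lines))
--     return "".join(lines[start:end])
-- ===== Notes on version B (the rewrite author's own statement) =====
-- stated objective: simpler
-- what changed: Replaces A's single pass carrying an in_types flag and an accumulator with explicit boundary finding: locate the first top-level 'types:' line, then the first later top-level non-'types:' key, and join the slice between them.
import Mathlib
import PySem

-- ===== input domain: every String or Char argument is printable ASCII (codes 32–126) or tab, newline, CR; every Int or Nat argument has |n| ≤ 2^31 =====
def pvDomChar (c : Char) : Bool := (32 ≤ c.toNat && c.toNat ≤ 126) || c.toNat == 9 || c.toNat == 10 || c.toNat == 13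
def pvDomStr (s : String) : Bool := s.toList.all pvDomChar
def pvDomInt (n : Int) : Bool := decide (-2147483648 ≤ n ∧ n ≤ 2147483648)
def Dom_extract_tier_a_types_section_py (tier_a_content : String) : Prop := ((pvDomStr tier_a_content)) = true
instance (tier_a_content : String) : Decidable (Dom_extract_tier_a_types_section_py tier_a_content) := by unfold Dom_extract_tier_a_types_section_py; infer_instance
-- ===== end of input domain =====

-- B replaces A's flag-carrying single pass by boundary finding (first `types:` top-level key,
-- then the first later non-`types:` top-level key) and a slice; objective: simpler, same cost.

-- shared helper: str.splitlines(keepends=True), hand-ported (PySem.Str.splitlines drops the ends).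
-- Exact on the input domain: there the only line-break characters are '\n', '\r' and the pair "\r\n".
def pvSplitKeepGo (cur : List Char) : List Char → List (List Char)
  | [] => if cur.isEmpty then [] else [cur.reverse]
  | '\r' :: '\n' :: rest => (('\n' :: '\r' :: cur).reverse) :: pvSplitKeepGo [] rest
  | '\n' :: rest => (('\n' :: cur).reverse) :: pvSplitKeepGo [] rest
  | '\r' :: rest => (('\r' :: cur).reverse) :: pvSplitKeepGo [] rest
  | c :: rest => pvSplitKeepGo (c :: cur) rest

def pvSplitKeep (s : List Char) : List (List Char) := pvSplitKeepGo [] s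

-- ===== PORT A =====
-- the for-loop with its `result` accumulator and `in_types` flag (break = return result)
def pvAGo (lines result : List (List Char)) (inTypes : Bool) : List (List Char) :=
  match lines with
  | [] => result
  | line :: rest =>
    let stripped := PySem.Chars.rstrip line
    -- stripped[0] is only read under the `stripped` (nonempty) guard, so headD is exact here
    if !stripped.isEmpty && !(PySem.Chars.isspace (stripped.headD ' ')) && PySem.Chars.endswith stripped [':'] then
      if stripped == "types:".toList then
        pvAGo rest (result ++ [line]) true
      else if inTypes then
        result  -- break
      else
        pvAGo rest result inTypes  -- falls through; `if in_types` appends nothing here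
    else
      if inTypes then pvAGo rest (result ++ [line]) inTypes
      else pvAGo rest result inTypes

def extract_tier_a_types_section_py (tier_a_content : String) : String :=
  let lines := pvSplitKeep tier_a_content.toList
  let result := pvAGo lines [] false
  if result.isEmpty then "" else String.ofList (PySem.Chars.join [] result)

-- ===== PORT B =====
def pvIsTopLevelKey (line : List Char) : Bool :=
  let stripped := PySem.Chars.rstrip line
  !stripped.isEmpty && !(PySem.Chars.isspace (stripped.headD ' ')) && PySem.Chars.endswith stripped [':']

def extract_tier_a_types_section_py_alt (tier_a_content : String) : String :=
  let lines := pvSplitKeep tier_a_content.toList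
  match lines.findIdx? (fun ln => pvIsTopLevelKey ln && PySem.Chars.rstrip ln == "types:".toList) with
  | none => ""
  | some start =>
    let stop :=
      match (lines.drop (start + 1)).findIdx?
              (fun ln => pvIsTopLevelKey ln && PySem.Chars.rstrip ln != "types:".toList) with
      | some k => start + 1 + k
      | none => lines.length
    String.ofList (PySem.Chars.join [] ((lines.drop start).take (stop - start)))

-- ===== PRECONDITION & SPEC =====
def Spec_extract_tier_a_types_section_py (tier_a_content : String) (out : String) : Prop := out = extract_tier_a_types_section_py_alt tier_a_content
instance (tier_a_content : String) (out : String) : Decidable (Spec_extract_tier_a_types_section_py tier_a_content out) := by unfold Spec_extract_tier_a_types_section_py; infer_instance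

-- ===== CLAIM (what is proved, stated in full; the proofs are below) =====
def Claim_equal_extract_tier_a_types_section_py : Prop := ∀ (tier_a_content : String), Dom_extract_tier_a_types_section_py tier_a_content → Spec_extract_tier_a_types_section_py tier_a_content (extract_tier_a_types_section_py tier_a_content)

-- ===== LEMMAS AND PROOFS =====

-- abbreviations for the two kinds of boundary lines
def pvP (ln : List Char) : Bool := pvIsTopLevelKey ln && (PySem.Chars.rstrip ln == "types:".toList)
def pvQ (ln : List Char) : Bool := pvIsTopLevelKey ln && !(PySem.Chars.rstrip ln == "types:".toList)

-- end-boundary index as B computes it (list level)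
def pvStop (ls : List (List Char)) (i : Nat) : Nat :=
  match (ls.drop (i + 1)).findIdx? pvQ with
  | some k => i + 1 + k
  | none => ls.length

lemma take_findIdx?_eq_takeWhile {α : Type} (p : α → Bool) :
    ∀ xs : List α,
      xs.take (match xs.findIdx? p with | some k => k | none => xs.length)
        = xs.takeWhile (fun x => !p x) := by
  intro xs
  induction xs with
  | nil => rfl
  | cons x xs ih =>
    by_cases h : p x
    · simp [List.findIdx?_cons, h]
    · rw [List.findIdx?_cons, if_neg (by simp [h])]
      cases hfi : xs.findIdx? p with
      | none =>
        rw [hfi] at ih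
        simp [h, ih]
      | some k =>
        rw [hfi] at ih
        simp [h, ih]

-- once `in_types` is true, A appends every line up to (excluding) the first pvQ line
lemma aGo_true (ls : List (List Char)) : ∀ res, pvAGo ls res true = res ++ ls.takeWhile (fun ln => !pvQ ln) := by
  induction ls with
  | nil => intro res; simp [pvAGo]
  | cons l rest ih =>
    intro res
    show (if pvIsTopLevelKey l then _ else _) = _
    by_cases hk : pvIsTopLevelKey l
    · by_cases ht : PySem.Chars.rstrip l = ['t','y','p','e','s',':']
      · simp [hk, ht, ih, pvQ]
      · simp [hk, ht, pvQ]
    · simp [hk, ih, pvQ]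

-- from the initial state, A's result is exactly B's slice (at list level)
lemma aGo_false : ∀ ls : List (List Char),
    pvAGo ls [] false =
      (match ls.findIdx? pvP with
       | none => []
       | some i => (ls.drop i).take (pvStop ls i - i)) := by
  intro ls
  induction ls with
  | nil => rfl
  | cons l rest ih =>
    by_cases hp : pvP l
    · have hk : pvIsTopLevelKey l := by
        simp [pvP] at hp; exact hp.1
      have ht : PySem.Chars.rstrip l = ['t','y','p','e','s',':'] := by
        simp [pvP] at hp; simpa using hp.2
      show (if pvIsTopLevelKey l then _ else _) = _
      rw [if_pos hk]
      simp only [List.findIdx?_cons, hp, if_pos]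
      rw [if_pos (by simp [ht])]
      rw [aGo_true]
      simp only [List.nil_append, List.drop_zero, pvStop, List.drop_succ_cons, List.drop_zero,
        Nat.sub_zero]
      have htw := take_findIdx?_eq_takeWhile pvQ rest
      cases hfi : rest.findIdx? pvQ with
      | none =>
        rw [hfi] at htw
        simp [List.take_succ_cons, ← htw]
      | some k =>
        rw [hfi] at htw
        simp [Nat.one_add, List.take_succ_cons, ← htw]
    · -- head is not the start line: A skips it (in both of its branches), B shifts indices by one
      have hstep : pvAGo (l :: rest) [] false = pvAGo rest [] false := by
        show (if pvIsTopLevelKey l then _ else _) = _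
        by_cases hk : pvIsTopLevelKey l
        · have ht : PySem.Chars.rstrip l ≠ ['t','y','p','e','s',':'] := by
            intro h
            exact hp (by simp [pvP, hk, h])
          simp [hk, ht]
        · simp [hk]
      rw [hstep, ih]
      simp only [List.findIdx?_cons, hp, if_neg, Bool.false_eq_true, not_false_iff]
      cases hfi : rest.findIdx? pvP with
      | none => simp
      | some i =>
        simp only [Option.map_some, List.drop_succ_cons]
        have hcount : pvStop (l :: rest) (i + 1) - (i + 1) = pvStop rest i - i := by
          unfold pvStop
          simp only [List.drop_succ_cons, List.length_cons]
          cases h : (rest.drop (i + 1)).findIdx? pvQ with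
          | none => simp
          | some k => simp; omega
        rw [hcount]

-- the predicates written inline in B's port are pvP / pvQ
lemma pvP_eq : (fun ln => pvIsTopLevelKey ln && PySem.Chars.rstrip ln == "types:".toList) = pvP := rfl
lemma pvQ_eq : (fun ln => pvIsTopLevelKey ln && PySem.Chars.rstrip ln != "types:".toList) = pvQ := rfl

-- ===== VERDICT (by name: the statement is the Claim_ definition above) =====
theorem extract_tier_a_types_section_py_spec : Claim_equal_extract_tier_a_types_section_py := by
  intro s _
  show extract_tier_a_types_section_py s = extract_tier_a_types_section_py_alt s
  unfold extract_tier_a_types_section_py extract_tier_a_types_section_py_alt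
  dsimp only
  rw [pvP_eq, pvQ_eq, aGo_false]
  cases hfi : (pvSplitKeep s.toList).findIdx? pvP with
  | none => simp
  | some i =>
    have hi : i < (pvSplitKeep s.toList).length :=
      (List.findIdx?_eq_some_iff_findIdx_eq.mp hfi).1
    have hstop : i < pvStop (pvSplitKeep s.toList) i := by
      unfold pvStop
      cases (pvSplitKeep s.toList).drop (i + 1) |>.findIdx? pvQ <;> (simp; omega)
    have hne : ((pvSplitKeep s.toList).drop i).take (pvStop (pvSplitKeep s.toList) i - i) ≠ [] := by
      cases hdd : (pvSplitKeep s.toList).drop i with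
      | nil => simp [List.drop_eq_nil_iff] at hdd; omega
      | cons a t =>
        cases hn : pvStop (pvSplitKeep s.toList) i - i with
        | zero => omega
        | succ m => simp [List.take_succ_cons]
    simp only [pvStop] at hne
    simp [hne, pvStop]
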